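-- pv_equiv track=rewrite | github.com/C-Kernel-Engine/C-Kernel-Engine | version/v7/scripts/build_spec06_probe_contract_v7.py | _layout_case_budget
-- ===== SOURCE A (Python) =====
-- LAYOUT_ORDER = ("bullet-panel", "compare-panels", "stat-cards", "spectrum-band", "flow-steps")
--
-- def _layout_case_budget(limit: int) -> dict[str, int]:
--     budgets = {layout: 1 for layout in LAYOUT_ORDER}
--     remaining = max(0, int(limit) - len(LAYOUT_ORDER))
--     allocation_order = (
--         "bullet-panel",
--         "compare-panels",
--         "stat-cards",
--         "spectrum-band",
--         "flow-steps",
--         "bullet-panel",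
--         "compare-panels",
--     )
--     idx = 0
--     while remaining > 0:
--         budgets[allocation_order[idx % len(allocation_order)]] += 1
--         remaining -= 1
--         idx += 1
--     return budgets
-- ===== SOURCE B (Python) =====
-- LAYOUT_ORDER = ("bullet-panel", "compare-panels", "stat-cards", "spectrum-band", "flow-steps")
--
-- def _layout_case_budget(limit: int) -> dict[str, int]:
--     # Closed form: each full 7-step cycle gives bullet-panel and compare-panels 2
--     # extra units and every other layout 1; the leftover m < 7 steps hit the first
--     # m positions of the cycle (bp, cp, sc, sb, fs, bp, cp).
--     remaining = max(0, int(limit) - len(LAYOUT_ORDER))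
--     q, m = divmod(remaining, 7)
--     extra = (
--         2 * q + (m >= 1) + (m >= 6),
--         2 * q + (m >= 2),
--         q + (m >= 3),
--         q + (m >= 4),
--         q + (m >= 5),
--     )
--     return {name: 1 + e for name, e in zip(LAYOUT_ORDER, extra)}
-- ===== Notes on version B (the rewrite author's own statement) =====
-- stated objective: faster
-- what changed: Replaces the O(limit) one-unit-per-iteration while loop with a closed form: division of the remaining budget by the allocation-cycle length gives the full-cycle count, and the remainder selects which leading cycle positions get one more unit.
import Mathlib
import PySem

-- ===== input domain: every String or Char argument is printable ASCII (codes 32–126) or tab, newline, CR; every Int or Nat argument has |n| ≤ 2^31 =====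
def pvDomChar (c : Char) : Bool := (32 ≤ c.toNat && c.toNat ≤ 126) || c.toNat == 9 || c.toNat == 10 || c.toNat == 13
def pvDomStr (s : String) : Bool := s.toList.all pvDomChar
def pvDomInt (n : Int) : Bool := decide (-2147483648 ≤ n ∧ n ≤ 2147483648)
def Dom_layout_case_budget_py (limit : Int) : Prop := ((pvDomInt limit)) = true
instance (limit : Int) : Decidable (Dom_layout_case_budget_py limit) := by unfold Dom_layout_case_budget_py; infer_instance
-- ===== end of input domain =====

-- B replaces A's O(limit) one-unit-per-step while loop by an O(1) closed form
-- (full-cycle count via divmod plus remainder tests); return values proved equal.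

-- ===== PORT A =====
-- LAYOUT_ORDER (module constant, shared by both ports)
def pvLayoutOrder : List String :=
  ["bullet-panel", "compare-panels", "stat-cards", "spectrum-band", "flow-steps"]

def pvAllocOrder : List String :=
  ["bullet-panel", "compare-panels", "stat-cards", "spectrum-band", "flow-steps",
   "bullet-panel", "compare-panels"]

-- the while loop: budgets[allocation_order[idx % 7]] += 1; remaining -= 1; idx += 1
def pvLoopA (budgets : PySem.Dict String Int) (remaining : Int) (idx : Int) :
    PySem.Dict String Int :=
  if remaining > 0 then
    pvLoopA
      (budgets.modify
        (PySem.List.pyGetD pvAllocOrder (PySem.Int.mod idx (pvAllocOrder.length : Int)) "")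
        0 (· + 1))
      (remaining - 1) (idx + 1)
  else budgets
termination_by remaining.toNat
decreasing_by omega

def layout_case_budget_py (limit : Int) : List (String × Int) :=
  let budgets := pvLayoutOrder.foldl (fun d l => d.insert l 1) PySem.Dict.empty
  let remaining := max 0 (limit - (pvLayoutOrder.length : Int))
  (pvLoopA budgets remaining 0).items

-- ===== PORT B =====
def pvB2I (b : Bool) : Int := if b then 1 else 0

def layout_case_budget_py_alt (limit : Int) : List (String × Int) :=
  let remaining := max 0 (limit - (pvLayoutOrder.length : Int))
  let q := PySem.Int.floordiv remaining 7
  let m := PySem.Int.mod remaining 7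
  let extra : List Int :=
    [2 * q + pvB2I (m ≥ 1) + pvB2I (m ≥ 6),
     2 * q + pvB2I (m ≥ 2),
     q + pvB2I (m ≥ 3),
     q + pvB2I (m ≥ 4),
     q + pvB2I (m ≥ 5)]
  (pvLayoutOrder.zip extra).map (fun p => (p.1, 1 + p.2))

-- ===== PRECONDITION & SPEC =====
def Spec_layout_case_budget_py (limit : Int) (out : List (String × Int)) : Prop := out = layout_case_budget_py_alt limit
instance (limit : Int) (out : List (String × Int)) : Decidable (Spec_layout_case_budget_py limit out) := by unfold Spec_layout_case_budget_py; infer_instance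

-- ===== CLAIM (what is proved, stated in full; the proofs are below) =====
def Claim_equal_layout_case_budget_py : Prop := ∀ (limit : Int), Dom_layout_case_budget_py limit → Spec_layout_case_budget_py limit (layout_case_budget_py limit)

-- ===== LEMMAS AND PROOFS =====

-- canonical state of A's dict: the five fixed keys with their current counts
def pvMkD (a b c e f : Int) : PySem.Dict String Int :=
  PySem.Dict.mk [("bullet-panel", a), ("compare-panels", b), ("stat-cards", c),
                 ("spectrum-band", e), ("flow-steps", f)]

-- Nat-counted version of the loop, for induction
def pvLoopN (budgets : PySem.Dict String Int) : Nat → Int → PySem.Dict String Int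
  | 0, _ => budgets
  | n + 1, idx =>
      pvLoopN
        (budgets.modify
          (PySem.List.pyGetD pvAllocOrder (PySem.Int.mod idx (pvAllocOrder.length : Int)) "")
          0 (· + 1))
        n (idx + 1)

lemma pvLoopA_eq_pvLoopN (d : PySem.Dict String Int) (r idx : Int) :
    pvLoopA d r idx = pvLoopN d r.toNat idx := by
  generalize h : r.toNat = n
  induction n generalizing d r idx with
  | zero => rw [pvLoopA]; simp [pvLoopN]; omega
  | succ n ih =>
      rw [pvLoopA]
      have hr : r > 0 := by omega
      simp only [hr, if_pos, pvLoopN]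
      exact ih _ _ _ (by omega)

lemma pvLoopN_period (d : PySem.Dict String Int) (n : Nat) (idx : Int) :
    pvLoopN d n (idx + 7) = pvLoopN d n idx := by
  induction n generalizing d idx with
  | zero => rfl
  | succ n ih =>
      simp only [pvLoopN]
      have hlen : (pvAllocOrder.length : Int) = 7 := by norm_num [pvAllocOrder]
      rw [show PySem.Int.mod (idx + 7) (pvAllocOrder.length : Int)
            = PySem.Int.mod idx (pvAllocOrder.length : Int) by
        rw [hlen, PySem.Int.mod_eq_emod_of_pos (by norm_num),
            PySem.Int.mod_eq_emod_of_pos (by norm_num)]; omega]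
      have := ih (d := (d.modify
          (PySem.List.pyGetD pvAllocOrder (PySem.Int.mod idx (pvAllocOrder.length : Int)) "")
          0 (· + 1))) (idx := idx + 1)
      rw [show idx + 7 + 1 = idx + 1 + 7 by ring]
      exact this

-- the five single-step updates on the canonical state
lemma pvStep_bp (a b c e f : Int) :
    (pvMkD a b c e f).modify "bullet-panel" 0 (· + 1) = pvMkD (a + 1) b c e f := by
  simp [pysem, pvMkD, PySem.Dict.modify, PySem.Dict.insert, PySem.Dict.getD, PySem.Dict.get?_mk_cons]
lemma pvStep_cp (a b c e f : Int) :
    (pvMkD a b c e f).modify "compare-panels" 0 (· + 1) = pvMkD a (b + 1) c e f := by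
  simp [pysem, pvMkD, PySem.Dict.modify, PySem.Dict.insert, PySem.Dict.getD, PySem.Dict.get?_mk_cons]
lemma pvStep_sc (a b c e f : Int) :
    (pvMkD a b c e f).modify "stat-cards" 0 (· + 1) = pvMkD a b (c + 1) e f := by
  simp [pysem, pvMkD, PySem.Dict.modify, PySem.Dict.insert, PySem.Dict.getD, PySem.Dict.get?_mk_cons]
lemma pvStep_sb (a b c e f : Int) :
    (pvMkD a b c e f).modify "spectrum-band" 0 (· + 1) = pvMkD a b c (e + 1) f := by
  simp [pysem, pvMkD, PySem.Dict.modify, PySem.Dict.insert, PySem.Dict.getD, PySem.Dict.get?_mk_cons]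
lemma pvStep_fs (a b c e f : Int) :
    (pvMkD a b c e f).modify "flow-steps" 0 (· + 1) = pvMkD a b c e (f + 1) := by
  simp [pysem, pvMkD, PySem.Dict.modify, PySem.Dict.insert, PySem.Dict.getD, PySem.Dict.get?_mk_cons]

-- closed-form extra counts after n loop steps starting at idx = 0
def pvEbp (n : Nat) : Int := 2 * (n / 7 : Nat) + (if 1 ≤ n % 7 then 1 else 0) + (if 6 ≤ n % 7 then 1 else 0)
def pvEcp (n : Nat) : Int := 2 * (n / 7 : Nat) + (if 2 ≤ n % 7 then 1 else 0)
def pvEsc (n : Nat) : Int := (n / 7 : Nat) + (if 3 ≤ n % 7 then 1 else 0)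
def pvEsb (n : Nat) : Int := (n / 7 : Nat) + (if 4 ≤ n % 7 then 1 else 0)
def pvEfs (n : Nat) : Int := (n / 7 : Nat) + (if 5 ≤ n % 7 then 1 else 0)

lemma pvLoopN_closed (n : Nat) : ∀ (a b c e f : Int),
    pvLoopN (pvMkD a b c e f) n 0 =
      pvMkD (a + pvEbp n) (b + pvEcp n) (c + pvEsc n) (e + pvEsb n) (f + pvEfs n) := by
  induction n using Nat.strong_induction_on with
  | _ n ih =>
    intro a b c e f
    by_cases hn : n < 7
    · interval_cases n <;>
        simp [pvLoopN, pvAllocOrder, PySem.Int.mod, PySem.List.pyGetD,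
              pvStep_bp, pvStep_cp, pvStep_sc, pvStep_sb, pvStep_fs,
              pvEbp, pvEcp, pvEsc, pvEsb, pvEfs] ;
        simp [pvMkD] ; ring_nf
    · obtain ⟨m, rfl⟩ : ∃ m, n = m + 7 := ⟨n - 7, by omega⟩
      show pvLoopN (pvMkD a b c e f) (m + 7) 0 = _
      have k0 : PySem.List.pyGetD pvAllocOrder (PySem.Int.mod 0 (pvAllocOrder.length : Int)) "" = "bullet-panel" := by decide
      have k1 : PySem.List.pyGetD pvAllocOrder (PySem.Int.mod (0+1) (pvAllocOrder.length : Int)) "" = "compare-panels" := by decide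
      have k2 : PySem.List.pyGetD pvAllocOrder (PySem.Int.mod (0+1+1) (pvAllocOrder.length : Int)) "" = "stat-cards" := by decide
      have k3 : PySem.List.pyGetD pvAllocOrder (PySem.Int.mod (0+1+1+1) (pvAllocOrder.length : Int)) "" = "spectrum-band" := by decide
      have k4 : PySem.List.pyGetD pvAllocOrder (PySem.Int.mod (0+1+1+1+1) (pvAllocOrder.length : Int)) "" = "flow-steps" := by decide
      have k5 : PySem.List.pyGetD pvAllocOrder (PySem.Int.mod (0+1+1+1+1+1) (pvAllocOrder.length : Int)) "" = "bullet-panel" := by decide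
      have k6 : PySem.List.pyGetD pvAllocOrder (PySem.Int.mod (0+1+1+1+1+1+1) (pvAllocOrder.length : Int)) "" = "compare-panels" := by decide
      have h7 : pvLoopN (pvMkD a b c e f) (m + 7) 0
          = pvLoopN (pvMkD (a + 1 + 1) (b + 1 + 1) (c + 1) (e + 1) (f + 1)) m (0+1+1+1+1+1+1+1) := by
        simp only [pvLoopN]
        simp only [k0, k1, k2, k3, k4, k5, k6,
              pvStep_bp, pvStep_cp, pvStep_sc, pvStep_sb, pvStep_fs]
      rw [h7, show (0+1+1+1+1+1+1+1 : Int) = 0 + 7 by ring, pvLoopN_period, ih m (by omega)]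
      have hd : (m + 7) / 7 = m / 7 + 1 := by omega
      have hm : (m + 7) % 7 = m % 7 := by omega
      simp only [pvEbp, pvEcp, pvEsc, pvEsb, pvEfs, hd, hm, pvMkD]
      norm_num
      refine ⟨by ring, by ring, by ring,
              by ring, by ring⟩

lemma pvA_eq (limit : Int) :
    layout_case_budget_py limit
      = (pvLoopA (pvMkD 1 1 1 1 1) (max 0 (limit - 5)) 0).items := rfl

lemma pvAlt_eq (limit : Int) :
    layout_case_budget_py_alt limit =
      [("bullet-panel", 1 + (2 * PySem.Int.floordiv (max 0 (limit - 5)) 7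
          + pvB2I (PySem.Int.mod (max 0 (limit - 5)) 7 ≥ 1)
          + pvB2I (PySem.Int.mod (max 0 (limit - 5)) 7 ≥ 6))),
       ("compare-panels", 1 + (2 * PySem.Int.floordiv (max 0 (limit - 5)) 7
          + pvB2I (PySem.Int.mod (max 0 (limit - 5)) 7 ≥ 2))),
       ("stat-cards", 1 + (PySem.Int.floordiv (max 0 (limit - 5)) 7
          + pvB2I (PySem.Int.mod (max 0 (limit - 5)) 7 ≥ 3))),
       ("spectrum-band", 1 + (PySem.Int.floordiv (max 0 (limit - 5)) 7
          + pvB2I (PySem.Int.mod (max 0 (limit - 5)) 7 ≥ 4))),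
       ("flow-steps", 1 + (PySem.Int.floordiv (max 0 (limit - 5)) 7
          + pvB2I (PySem.Int.mod (max 0 (limit - 5)) 7 ≥ 5)))] := rfl

-- ===== VERDICT (by name: the statement is the Claim_ definition above) =====
theorem layout_case_budget_py_spec : Claim_equal_layout_case_budget_py := by
  intro limit _
  unfold Spec_layout_case_budget_py
  rw [pvA_eq, pvAlt_eq]
  obtain ⟨n, hn⟩ : ∃ n : Nat, max 0 (limit - 5) = (n : Int) :=
    ⟨(max 0 (limit - 5)).toNat, by omega⟩
  rw [hn, pvLoopA_eq_pvLoopN]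
  rw [show ((n : Int)).toNat = n from Int.toNat_natCast n, pvLoopN_closed]
  rw [show PySem.Int.floordiv (n : Int) 7 = ((n / 7 : Nat) : Int) from
        by exact_mod_cast PySem.Int.floordiv_natCast n 7]
  rw [show PySem.Int.mod (n : Int) 7 = ((n % 7 : Nat) : Int) from
        by exact_mod_cast PySem.Int.mod_natCast n 7]
  simp only [pvMkD, pvEbp, pvEcp, pvEsc, pvEsb, pvEfs, pvB2I, ge_iff_le,
             List.cons.injEq, Prod.mk.injEq, and_true, decide_eq_true_eq]
  and_intros <;> first | trivial | (split_ifs <;> omega)
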